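-- pv_equiv track=rewrite | github.com/Elif1203terminal/dopamine | reward_pathway_agent.py | _is_wall_following
-- ===== SOURCE A (Python) =====
-- def _is_wall_following(pattern):
--     """Detect if a pattern represents wall-following behavior"""
--     # Wall following often alternates between two directions
--     parts = pattern.split("-")
--     if len(parts) < 3:
--         return False
--
--     # Check for alternating pattern like R-U-R-U or similar
--     directions = [p[-1] for p in parts]  # Extract just the direction
--     alternating = True
--     for i in range(2, len(directions)):
--         if directions[i] != directions[i-2]:
--             alternating = False
--             break
--
--     return alternating
-- ===== SOURCE B (Python) =====
-- def _is_wall_following(pattern):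
--     parts = pattern.split("-")
--     if len(parts) < 3:
--         return False
--     directions = [p[-1] for p in parts]
--     # partition directions by index parity, then each bucket must be homogeneous
--     buckets = ([], [])
--     for i, d in enumerate(directions):
--         buckets[i % 2].append(d)
--     return all(len(set(b)) <= 1 for b in buckets)
-- ===== Notes on version B (the rewrite author's own statement) =====
-- stated objective: alternative
-- what changed: A's single indexed pairwise scan (directions[i] != directions[i-2] with a break) is replaced by partitioning the directions into even- and odd-indexed buckets in one enumerate pass and then checking each bucket is homogeneous via len(set(bucket)) <= 1.
import Mathlib
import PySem

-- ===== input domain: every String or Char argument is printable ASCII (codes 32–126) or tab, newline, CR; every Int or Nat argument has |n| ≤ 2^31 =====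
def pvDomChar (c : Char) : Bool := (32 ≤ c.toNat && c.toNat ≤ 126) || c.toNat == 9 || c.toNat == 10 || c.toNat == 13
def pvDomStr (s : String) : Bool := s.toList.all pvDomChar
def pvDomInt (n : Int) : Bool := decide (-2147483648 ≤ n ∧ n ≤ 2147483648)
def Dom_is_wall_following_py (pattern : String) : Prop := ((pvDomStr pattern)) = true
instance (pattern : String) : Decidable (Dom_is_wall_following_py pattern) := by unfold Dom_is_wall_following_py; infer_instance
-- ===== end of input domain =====

-- B replaces A's indexed pairwise scan (with break) by one enumerate pass that partitions the
-- directions into even-/odd-index buckets and then checks each bucket has at most one distinct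
-- element (Python set); objective: alternative.

-- ===== PORT A =====
-- 'for i in range(2, len(directions)): if directions[i] != directions[i-2]: alternating = False; break'
def pvLoopA (d : List (Option Char)) (i : Nat) : Bool :=
  if _h : i < d.length then
    if d[i]? ≠ d[i-2]? then false else pvLoopA d (i+1)
  else true
termination_by d.length - i

def is_wall_following_py (pattern : String) : Bool :=
  let parts := (PySem.Str.split? pattern "-").getD []  -- sep "-" ≠ "", so split? is some: exact
  if parts.length < 3 then false
  else
    let directions := parts.map (fun p => PySem.Str.pyGet? p (-1))  -- p[-1]; none = IndexError, excluded by Pre_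
    pvLoopA directions 2

-- ===== PORT B =====
def is_wall_following_py_alt (pattern : String) : Bool :=
  let parts := (PySem.Str.split? pattern "-").getD []  -- sep "-" ≠ "", so split? is some: exact
  if parts.length < 3 then false
  else
    let directions := parts.map (fun p => PySem.Str.pyGet? p (-1))  -- p[-1]; none = IndexError, excluded by Pre_
    -- 'for i, d in enumerate(directions): buckets[i % 2].append(d)'
    let buckets := (PySem.List.enumerate directions).foldl
      (fun (b : List (Option Char) × List (Option Char)) p =>
        if PySem.Int.mod p.1 2 == 0 then (b.1 ++ [p.2], b.2) else (b.1, b.2 ++ [p.2]))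
      ([], [])
    -- 'all(len(set(b)) <= 1 for b in buckets)'
    [buckets.1, buckets.2].all (fun b => decide (PySem.Set.len (PySem.Set.ofList b) ≤ 1))

-- ===== PRECONDITION & SPEC =====
-- Pre_ excludes exactly the inputs on which Python A raises IndexError: at least 3 dash-separated
-- parts and some part empty ('' has no p[-1]).  (Python B raises there identically.)
def Pre_is_wall_following_py (pattern : String) : Prop :=
  ((PySem.Str.split? pattern "-").getD []).length < 3 ∨ ∀ p ∈ (PySem.Str.split? pattern "-").getD [], p ≠ ""
instance (pattern : String) : Decidable (Pre_is_wall_following_py pattern) := by unfold Pre_is_wall_following_py; infer_instance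

def pvWitness_is_wall_following_py : String := "R-U-R-U"

def Spec_is_wall_following_py (pattern : String) (out : Bool) : Prop := out = is_wall_following_py_alt pattern
instance (pattern : String) (out : Bool) : Decidable (Spec_is_wall_following_py pattern out) := by unfold Spec_is_wall_following_py; infer_instance

-- ===== CLAIM (what is proved, stated in full; the proofs are below) =====
def Claim_equal_is_wall_following_py : Prop := ∀ (pattern : String), Dom_is_wall_following_py pattern → Pre_is_wall_following_py pattern → Spec_is_wall_following_py pattern (is_wall_following_py pattern)

-- ===== LEMMAS AND PROOFS =====

-- reference splitter: pvStride l = (elements at even indices, elements at odd indices)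
def pvStride : List (Option Char) → List (Option Char) × List (Option Char)
  | [] => ([], [])
  | a :: l => ((a :: (pvStride l).2), (pvStride l).1)

-- A's loop from index i succeeds iff every in-range index k ≥ i matches index k-2.
theorem pvLoopA_iff (d : List (Option Char)) (i : Nat) :
    pvLoopA d i = true ↔ ∀ k, i ≤ k → k < d.length → d[k]? = d[k-2]? := by
  fun_induction pvLoopA d i with
  | case1 i h hne =>
      simp only [Bool.false_eq_true, false_iff]
      intro H
      exact hne (H i (le_refl i) h)
  | case2 i h heq ih =>
      simp only [ne_eq, not_not] at heq
      rw [ih]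
      constructor
      · intro H k hk hklen
        rcases Nat.eq_or_lt_of_le hk with rfl | hlt
        · exact heq
        · exact H k hlt hklen
      · intro H k hk hklen
        exact H k (Nat.le_of_succ_le hk) hklen
  | case3 i h =>
      simp only [true_iff]
      intro k hk hklen
      omega

-- B's enumerate fold is pvStride (with the accumulator appended in front).
theorem pvFold_stride (l : List (Option Char)) :
    ∀ (s : Int) (acc : List (Option Char) × List (Option Char)), 0 ≤ s →
    (PySem.List.enumerate l s).foldl
      (fun (b : List (Option Char) × List (Option Char)) p =>
        if PySem.Int.mod p.1 2 == 0 then (b.1 ++ [p.2], b.2) else (b.1, b.2 ++ [p.2])) acc =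
    (if s % 2 = 0 then (acc.1 ++ (pvStride l).1, acc.2 ++ (pvStride l).2)
     else (acc.1 ++ (pvStride l).2, acc.2 ++ (pvStride l).1)) := by
  induction l with
  | nil =>
      intro s acc _
      by_cases h : s % 2 = 0 <;> simp [PySem.List.enumerate_nil, pvStride, h]
  | cons a l ih =>
      intro s acc hs
      rw [PySem.List.enumerate_cons, List.foldl_cons]
      have hmod : PySem.Int.mod s 2 = s % 2 := by
        show Int.fmod s 2 = s % 2
        rw [Int.fmod_eq_emod]; norm_num
      by_cases h : s % 2 = 0
      · have hg : (PySem.Int.mod s 2 == 0) = true := by rw [hmod]; simp [h]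
        simp only [hg, if_pos]
        rw [ih (s+1) _ (by omega)]
        have h1 : ¬ (s+1) % 2 = 0 := by omega
        simp [h, h1, pvStride]
      · have hg : (PySem.Int.mod s 2 == 0) = false := by rw [hmod]; simp [h]
        simp only [hg, Bool.false_eq_true, if_false]
        rw [ih (s+1) _ (by omega)]
        have h1 : (s+1) % 2 = 0 := by omega
        simp [h, h1, pvStride]

def pvHomog (l : List (Option Char)) : Prop := ∀ x ∈ l, ∀ y ∈ l, x = y

-- len(set(b)) <= 1 says exactly that b is homogeneous.
theorem pvSetLen_iff (l : List (Option Char)) :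
    (PySem.Set.len (PySem.Set.ofList l) ≤ 1) ↔ pvHomog l := by
  rw [← PySem.List.dedup_eq_ofList]
  constructor
  · intro h x hx y hy
    rw [← PySem.List.mem_dedup] at hx hy
    match hd : PySem.List.dedup l, h with
    | [], _ => rw [hd] at hx; simp at hx
    | [z], _ =>
        rw [hd] at hx hy; simp at hx hy; rw [hx, hy]
    | z :: w :: t, h => simp [PySem.Set.len] at h; omega
  · intro h
    have hnd := PySem.List.nodup_dedup l
    match hd : PySem.List.dedup l with
    | [] => simp [PySem.Set.len]
    | [z] => simp [PySem.Set.len]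
    | z :: w :: t =>
        exfalso
        rw [hd] at hnd
        have hz : z ∈ l := by rw [← PySem.List.mem_dedup, hd]; simp
        have hw : w ∈ l := by rw [← PySem.List.mem_dedup, hd]; simp
        have := h z hz w hw
        simp [this] at hnd

-- the strided sublists index back into d
theorem pvStride_getElem? (d : List (Option Char)) :
    (∀ j, ((pvStride d).1)[j]? = d[2*j]?) ∧ (∀ j, ((pvStride d).2)[j]? = d[2*j+1]?) := by
  induction d with
  | nil => constructor <;> intro j <;> simp [pvStride]
  | cons a l ih =>
      constructor
      · intro j
        match j with
        | 0 => simp [pvStride]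
        | k+1 =>
            show ((pvStride l).2)[k]? = (a :: l)[2*(k+1)]?
            rw [ih.2 k]
            have : 2*(k+1) = (2*k+1) + 1 := by omega
            rw [this]; simp
      · intro j
        show ((pvStride l).1)[j]? = (a :: l)[2*j+1]?
        rw [ih.1 j]; simp

-- the common characterisation: every entry equals the entry at its index's parity
def pvR (d : List (Option Char)) : Prop := ∀ k, k < d.length → d[k]? = d[k % 2]?

theorem pvQ_iff_R (d : List (Option Char)) :
    (∀ k, 2 ≤ k → k < d.length → d[k]? = d[k-2]?) ↔ pvR d := by
  constructor
  · intro H k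
    induction k using Nat.strong_induction_on with
    | _ k ih =>
        intro hk
        by_cases h2 : 2 ≤ k
        · rw [H k h2 hk, ih (k-2) (by omega) (by omega)]
          congr 1; omega
        · have : k % 2 = k := by omega
          rw [this]
  · intro H k h2 hk
    rw [H k hk, H (k-2) (by omega)]
    congr 1; omega

theorem pvP_iff_R (d : List (Option Char)) :
    (pvHomog (pvStride d).1 ∧ pvHomog (pvStride d).2) ↔ pvR d := by
  obtain ⟨hE, hO⟩ := pvStride_getElem? d
  constructor
  · rintro ⟨h1, h2⟩ k hk
    rcases Nat.even_or_odd k with ⟨i, hi⟩ | ⟨i, hi⟩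
    · -- k = 2i, k % 2 = 0
      have hk0 : k % 2 = 0 := by omega
      obtain ⟨x, hx⟩ : ∃ x, d[k]? = some x := ⟨d[k], List.getElem?_eq_getElem hk⟩
      obtain ⟨y, hy⟩ : ∃ y, d[0]? = some y := ⟨d[0], List.getElem?_eq_getElem (by omega)⟩
      have hxm : x ∈ (pvStride d).1 := by
        rw [List.mem_iff_getElem?]; exact ⟨i, by rw [hE i, show 2*i = k by omega]; exact hx⟩
      have hym : y ∈ (pvStride d).1 := by
        rw [List.mem_iff_getElem?]; exact ⟨0, by rw [hE 0]; simpa using hy⟩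
      rw [hk0, hx, hy, h1 x hxm y hym]
    · -- k = 2i+1, k % 2 = 1
      have hk1 : k % 2 = 1 := by omega
      obtain ⟨x, hx⟩ : ∃ x, d[k]? = some x := ⟨d[k], List.getElem?_eq_getElem hk⟩
      obtain ⟨y, hy⟩ : ∃ y, d[1]? = some y := ⟨d[1]'(by omega), List.getElem?_eq_getElem (by omega)⟩
      have hxm : x ∈ (pvStride d).2 := by
        rw [List.mem_iff_getElem?]; exact ⟨i, by rw [hO i, show 2*i+1 = k by omega]; exact hx⟩
      have hym : y ∈ (pvStride d).2 := by
        rw [List.mem_iff_getElem?]; exact ⟨0, by rw [hO 0]; simpa using hy⟩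
      rw [hk1, hx, hy, h2 x hxm y hym]
  · intro H
    constructor
    · intro x hx y hy
      rw [List.mem_iff_getElem?] at hx hy
      obtain ⟨i, hi⟩ := hx; obtain ⟨j, hj⟩ := hy
      rw [hE i] at hi; rw [hE j] at hj
      have hil : 2*i < d.length := by
        by_contra h; rw [List.getElem?_eq_none (by omega)] at hi; simp at hi
      have hjl : 2*j < d.length := by
        by_contra h; rw [List.getElem?_eq_none (by omega)] at hj; simp at hj
      have h1 := H (2*i) hil
      have h2 := H (2*j) hjl
      rw [show 2*i % 2 = 0 by omega] at h1
      rw [show 2*j % 2 = 0 by omega] at h2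
      rw [h1] at hi; rw [h2] at hj
      rw [hi] at hj; exact Option.some.inj hj
    · intro x hx y hy
      rw [List.mem_iff_getElem?] at hx hy
      obtain ⟨i, hi⟩ := hx; obtain ⟨j, hj⟩ := hy
      rw [hO i] at hi; rw [hO j] at hj
      have hil : 2*i+1 < d.length := by
        by_contra h; rw [List.getElem?_eq_none (by omega)] at hi; simp at hi
      have hjl : 2*j+1 < d.length := by
        by_contra h; rw [List.getElem?_eq_none (by omega)] at hj; simp at hj
      have h1 := H (2*i+1) hil
      have h2 := H (2*j+1) hjl
      rw [show (2*i+1) % 2 = 1 by omega] at h1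
      rw [show (2*j+1) % 2 = 1 by omega] at h2
      rw [h1] at hi; rw [h2] at hj
      rw [hi] at hj; exact Option.some.inj hj

theorem pvLoop_eq_buckets (d : List (Option Char)) :
    pvLoopA d 2 =
      (((PySem.List.enumerate d).foldl
        (fun (b : List (Option Char) × List (Option Char)) p =>
          if PySem.Int.mod p.1 2 == 0 then (b.1 ++ [p.2], b.2) else (b.1, b.2 ++ [p.2])) ([], [])).1 ::
       [((PySem.List.enumerate d).foldl
        (fun (b : List (Option Char) × List (Option Char)) p =>
          if PySem.Int.mod p.1 2 == 0 then (b.1 ++ [p.2], b.2) else (b.1, b.2 ++ [p.2])) ([], [])).2]).all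
        (fun b => decide (PySem.Set.len (PySem.Set.ofList b) ≤ 1)) := by
  rw [pvFold_stride d 0 ([], []) (le_refl 0)]
  simp only [show (0:Int) % 2 = 0 from rfl, if_pos, List.nil_append, List.all_cons,
    List.all_nil, Bool.and_true]
  rw [Bool.eq_iff_iff, pvLoopA_iff]
  rw [Bool.and_eq_true, decide_eq_true_iff, decide_eq_true_iff, pvSetLen_iff, pvSetLen_iff]
  rw [pvQ_iff_R d, ← pvP_iff_R d]

-- ===== VERDICT (by name: the statement is the Claim_ definition above) =====
theorem is_wall_following_py_spec : Claim_equal_is_wall_following_py := by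
  intro pattern _ _
  unfold Spec_is_wall_following_py is_wall_following_py is_wall_following_py_alt
  by_cases h : ((PySem.Str.split? pattern "-").getD []).length < 3
  · simp [h]
  · simp only [h, if_false]
    exact pvLoop_eq_buckets _
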